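-- pv_equiv track=rewrite | github.com/TUCN1022/COMP9021 | 9021/ASS1/1_superpower.py | third_question
-- ===== SOURCE A (Python) =====
-- def third_question(input_list,nb_of_switches):
--     result=[]
--     data=input_list.copy()
--     for i in range(len(data)-nb_of_switches+1):
--         temp=data[:i]
--         for j in range(nb_of_switches):
--             temp.append(data[i+j]*-1)
--         temp.extend(data[i+nb_of_switches:])
--         result.append(sum(temp))
--     return max(result)
-- ===== SOURCE B (Python) =====
-- def third_question(input_list, nb_of_switches):
--     # O(n) sliding window: answer = total - 2 * (minimum window sum)
--     total = sum(input_list)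
--     w = sum(input_list[:nb_of_switches])
--     best = w
--     for i in range(nb_of_switches, len(input_list)):
--         w += input_list[i] - input_list[i - nb_of_switches]
--         if w < best:
--             best = w
--     return total - 2 * best
-- ===== Notes on version B (the rewrite author's own statement) =====
-- stated objective: faster
-- what changed: A rebuilds each of the n-k+1 sign-flipped copies of the list and re-sums it; B makes one sliding-window pass keeping the running window sum and its minimum and returns total - 2*min_window.
-- outside the precondition, e.g. on third_question([1, -2, 3], -1): A returns 5, B raises IndexError
import Mathlib
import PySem

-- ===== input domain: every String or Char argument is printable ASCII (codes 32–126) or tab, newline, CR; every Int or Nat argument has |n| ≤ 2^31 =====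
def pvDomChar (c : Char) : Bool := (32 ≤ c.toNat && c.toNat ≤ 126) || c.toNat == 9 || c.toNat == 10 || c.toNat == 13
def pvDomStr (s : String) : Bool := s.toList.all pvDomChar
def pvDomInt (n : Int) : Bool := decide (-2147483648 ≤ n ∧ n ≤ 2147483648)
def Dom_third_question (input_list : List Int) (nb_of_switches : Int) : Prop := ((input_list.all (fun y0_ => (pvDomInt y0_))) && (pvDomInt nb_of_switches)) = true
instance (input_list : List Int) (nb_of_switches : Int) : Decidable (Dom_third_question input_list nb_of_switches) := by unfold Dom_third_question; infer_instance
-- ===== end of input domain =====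

-- B replaces A's quadratic rebuild-and-resum of every flipped copy by one linear
-- sliding-window pass: answer = total - 2 * (minimum window sum).  Objective: faster.

-- ===== PORT A =====
def third_question (input_list : List Int) (nb_of_switches : Int) : Int :=
  let data := input_list
  let result := (PySem.List.pyRange 0 ((data.length : Int) - nb_of_switches + 1) 1).foldl
    (fun result i =>
      let temp := PySem.List.slice data none (some i)
      let temp := (PySem.List.pyRange 0 nb_of_switches 1).foldl
        (fun temp j => temp ++ [((PySem.List.pyGet? data (i + j)).getD 0) * -1]) temp
      let temp := temp ++ PySem.List.slice data (some (i + nb_of_switches)) none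
      result ++ [temp.sum]) []
  (PySem.List.max? result (fun x => x)).getD 0

-- ===== PORT B =====
def third_question_alt (input_list : List Int) (nb_of_switches : Int) : Int :=
  let total := input_list.sum
  let w0 := (PySem.List.slice input_list none (some nb_of_switches)).sum
  let st := (PySem.List.pyRange nb_of_switches (input_list.length : Int) 1).foldl
    (fun (st : Int × Int) i =>
      let w := st.1 + (PySem.List.pyGet? input_list i).getD 0
                    - (PySem.List.pyGet? input_list (i - nb_of_switches)).getD 0
      (w, if w < st.2 then w else st.2)) (w0, w0)
  total - 2 * st.2

-- ===== PRECONDITION & SPEC =====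
-- Pre_ excludes negative nb_of_switches — outside the task's natural domain (A there sums
-- lists with accidentally duplicated elements, and B raises IndexError) — and
-- nb_of_switches > len(input_list), where A raises ValueError on max of an empty list.
def Pre_third_question (input_list : List Int) (nb_of_switches : Int) : Prop :=
  0 ≤ nb_of_switches ∧ nb_of_switches ≤ (input_list.length : Int)
instance (input_list : List Int) (nb_of_switches : Int) : Decidable (Pre_third_question input_list nb_of_switches) := by unfold Pre_third_question; infer_instance
def pvWitness_third_question : List Int × Int := ([1, -2, 3], 2)

def Spec_third_question (input_list : List Int) (nb_of_switches : Int) (out : Int) : Prop := out = third_question_alt input_list nb_of_switches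
instance (input_list : List Int) (nb_of_switches : Int) (out : Int) : Decidable (Spec_third_question input_list nb_of_switches out) := by unfold Spec_third_question; infer_instance

-- ===== CLAIM (what is proved, stated in full; the proofs are below) =====
def Claim_equal_third_question : Prop := ∀ (input_list : List Int) (nb_of_switches : Int), Dom_third_question input_list nb_of_switches → Pre_third_question input_list nb_of_switches → Spec_third_question input_list nb_of_switches (third_question input_list nb_of_switches)


-- ===== LEMMAS AND PROOFS =====

-- proof-side names for the two loop bodies (definitionally equal to the ports' lambdas)
def pvATemp (data : List Int) (k i : Int) : Int :=
  (((PySem.List.pyRange 0 k 1).foldl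
      (fun temp j => temp ++ [((PySem.List.pyGet? data (i + j)).getD 0) * -1])
      (PySem.List.slice data none (some i)))
    ++ PySem.List.slice data (some (i + k)) none).sum

def pvStep (data : List Int) (k : Int) (st : Int × Int) (i : Int) : Int × Int :=
  let w := st.1 + (PySem.List.pyGet? data i).getD 0 - (PySem.List.pyGet? data (i - k)).getD 0
  (w, if w < st.2 then w else st.2)

-- appending one element per iteration is map
theorem pvFoldlAppend {α β : Type} (f : α → β) (l : List α) (init : List β) :
    l.foldl (fun r i => r ++ [f i]) init = init ++ l.map f := by
  induction l generalizing init with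
  | nil => simp
  | cons x t ih => simp [List.foldl_cons, ih]

theorem pvSumMapNeg (l : List Int) : (l.map (fun x => x * -1)).sum = -l.sum := by
  induction l with
  | nil => simp
  | cons x t ih => simp only [List.map_cons, List.sum_cons, ih]; ring

theorem pvSumTakeDrop (data : List Int) (i kn : Nat) :
    data.sum = (data.take i).sum + ((data.drop i).take kn).sum + (data.drop (i + kn)).sum := by
  have h1 := List.sum_take_add_sum_drop data i
  have h2 := List.sum_take_add_sum_drop (data.drop i) kn
  rw [List.drop_drop] at h2
  omega

theorem pvWindowMap (data : List Int) (i kn : Nat) (h : i + kn ≤ data.length) :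
    (List.range kn).map (fun (j : Nat) => ((PySem.List.pyGet? data ((i : Int) + (j : Int))).getD 0) * -1)
      = ((data.drop i).take kn).map (fun x => x * -1) := by
  apply List.ext_getElem
  · simp; omega
  · intro j h1 h2
    simp only [List.getElem_map, List.getElem_range, List.getElem_take, List.getElem_drop]
    have hc : (i : Int) + (j : Int) = ((i + j : Nat) : Int) := by push_cast; ring
    have hj : i + j < data.length := by
      simp at h1; omega
    rw [hc, PySem.List.pyGet?_natCast, List.getElem?_eq_getElem hj]
    rfl

theorem pvSlide (data : List Int) (kn m : Nat) (h : m + kn < data.length) :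
    ((data.drop (m + 1)).take kn).sum
      = ((data.drop m).take kn).sum - (data[m]?.getD 0) + (data[m + kn]?.getD 0) := by
  have hm : m < data.length := by omega
  cases kn with
  | zero => simp
  | succ j =>
    have hj : m + 1 + j < data.length := by omega
    have hj' : j < (data.drop (m + 1)).length := by simp; omega
    have e1 : ((data.drop (m + 1)).take (j + 1)).sum
        = ((data.drop (m + 1)).take j).sum + data[m + 1 + j] := by
      rw [List.sum_take_succ (data.drop (m+1)) j hj']
      congr 1
      exact List.getElem_drop
    have e2 : data.drop m = data[m] :: data.drop (m + 1) := List.drop_eq_getElem_cons hm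
    have e3 : ((data.drop m).take (j + 1)).sum = data[m] + ((data.drop (m + 1)).take j).sum := by
      rw [e2, List.take_succ_cons, List.sum_cons]
    have h4 : data[m]?.getD 0 = data[m] := by rw [List.getElem?_eq_getElem hm]; rfl
    have h5 : data[m + (j + 1)]?.getD 0 = data[m + 1 + j] := by
      have : m + (j + 1) = m + 1 + j := by omega
      rw [this, List.getElem?_eq_getElem hj]; rfl
    rw [e1, e3, h4, h5]; ring

theorem pvMaxMin (total : Int) (l : List Int) (x : Int) :
    List.foldl max (total - 2 * x) (l.map (fun s => total - 2 * s))
      = total - 2 * List.foldl (fun b w => if w < b then w else b) x l := by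
  induction l generalizing x with
  | nil => simp
  | cons s t ih =>
    simp only [List.map_cons, List.foldl_cons]
    have : max (total - 2 * x) (total - 2 * s) = total - 2 * (if s < x then s else x) := by
      split_ifs <;> omega
    rw [this, ih]

-- the value of the window sum A builds at start i
theorem pvATempEq (data : List Int) (kn t : Nat) (h : t + kn ≤ data.length) :
    pvATemp data (kn : Int) (t : Int)
      = data.sum - 2 * ((data.drop t).take kn).sum := by
  unfold pvATemp
  rw [PySem.List.pyRange_zero_nat, List.foldl_map, pvFoldlAppend, PySem.List.slice_to_natCast]
  have hc : (t : Int) + (kn : Int) = ((t + kn : Nat) : Int) := by push_cast; ring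
  rw [hc, PySem.List.slice_from_natCast, pvWindowMap data t kn h]
  rw [List.sum_append, List.sum_append, pvSumMapNeg]
  have := pvSumTakeDrop data t kn
  omega

-- loop invariant of B's sliding-window fold
theorem pvBInv (data : List Int) (kn : Nat) (hkn : kn ≤ data.length) (m : Nat)
    (hm : m ≤ data.length - kn) :
    ((List.range m).map (fun (t : Nat) => ((kn : Int) + (t : Int)))).foldl
        (pvStep data (kn : Int)) ((data.take kn).sum, (data.take kn).sum)
      = (((data.drop m).take kn).sum,
         ((List.range m).map (fun t => ((data.drop (t + 1)).take kn).sum)).foldl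
           (fun b w => if w < b then w else b) (data.take kn).sum) := by
  induction m with
  | zero => simp
  | succ m ih =>
    have hm' : m ≤ data.length - kn := by omega
    have hlt : m + kn < data.length := by omega
    rw [List.range_succ, List.map_append, List.foldl_append, ih hm',
        List.map_append, List.foldl_append]
    simp only [List.map_cons, List.map_nil, List.foldl_cons, List.foldl_nil]
    have hc1 : (kn : Int) + (m : Int) = ((kn + m : Nat) : Int) := by push_cast; ring
    unfold pvStep
    simp only [hc1]
    rw [show ((kn + m : Nat) : Int) - (kn : Int) = ((m : Nat) : Int) by push_cast; ring]
    rw [PySem.List.pyGet?_natCast, PySem.List.pyGet?_natCast]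
    have hw : ((data.drop m).take kn).sum + data[kn + m]?.getD 0 - data[m]?.getD 0
        = ((data.drop (m + 1)).take kn).sum := by
      rw [pvSlide data kn m hlt]
      rw [show m + kn = kn + m by omega]
      ring
    simp only [hw]

-- ===== VERDICT (by name: the statement is the Claim_ definition above) =====
theorem third_question_spec : Claim_equal_third_question := by
  intro xs k _ hpre
  obtain ⟨h0, hk⟩ := hpre
  unfold Spec_third_question
  lift k to Nat using h0 with kn
  have hkn : kn ≤ xs.length := by exact_mod_cast hk
  -- name the loop bodies
  have hA : third_question xs (kn : Int)
      = (PySem.List.max? ((PySem.List.pyRange 0 ((xs.length : Int) - (kn : Int) + 1) 1).foldl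
          (fun r i => r ++ [pvATemp xs (kn : Int) i]) []) (fun x => x)).getD 0 := rfl
  have hB : third_question_alt xs (kn : Int)
      = xs.sum - 2 * ((PySem.List.pyRange (kn : Int) (xs.length : Int) 1).foldl
          (pvStep xs (kn : Int))
          ((PySem.List.slice xs none (some (kn : Int))).sum,
           (PySem.List.slice xs none (some (kn : Int))).sum)).2 := rfl
  rw [hA, hB]
  -- A side
  have hb : ((xs.length : Int) - (kn : Int) + 1) = ((xs.length - kn + 1 : Nat) : Int) := by
    push_cast [hkn]; ring
  rw [hb, PySem.List.pyRange_zero_nat, List.foldl_map, pvFoldlAppend, List.nil_append]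
  have hmapA : (List.range (xs.length - kn + 1)).map (fun (t : Nat) => pvATemp xs (kn : Int) (t : Int))
      = (List.range (xs.length - kn + 1)).map
          (fun t => xs.sum - 2 * ((xs.drop t).take kn).sum) := by
    apply List.map_congr_left
    intro t ht
    have ht' : t + kn ≤ xs.length := by
      have := List.mem_range.mp ht; omega
    exact pvATempEq xs kn t ht'
  rw [hmapA, List.range_succ_eq_map, List.map_cons,
      PySem.List.max?_id_cons]
  simp only [List.drop_zero, Option.getD_some]
  rw [List.map_map]
  have hmm : ((List.range (xs.length - kn)).map
        ((fun t => xs.sum - 2 * ((xs.drop t).take kn).sum) ∘ Nat.succ))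
      = ((List.range (xs.length - kn)).map
          (fun t => ((xs.drop (t + 1)).take kn).sum)).map (fun s => xs.sum - 2 * s) := by
    rw [List.map_map]; rfl
  rw [hmm, pvMaxMin]
  -- B side
  have hb2 : ((xs.length : Int) - (kn : Int)).toNat = xs.length - kn := by omega
  rw [PySem.List.pyRange_one, hb2, List.foldl_map, PySem.List.slice_to_natCast]
  have := pvBInv xs kn hkn (xs.length - kn) (le_refl _)
  rw [List.foldl_map] at this ⊢
  rw [this]
  simp [List.foldl_map]
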